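-- pv_equiv track=rewrite | github.com/genomicepidemiology/kgt_mlst | kgt_mlst/determine_mlst.py | check_muliple_alelles
-- ===== SOURCE A (Python) =====
-- def check_muliple_alelles(found_genes, expected_genes):
--     flag = False
--     hits = set()
--     multiples = set()
--     mlst_genes = set()
--     for item in found_genes:
--         gene = item.split("_")[0]
--         if gene in expected_genes:
--             if gene not in hits:
--                 hits.add(gene)
--                 mlst_genes.add(item)
--             else:
--                 flag = True
--                 multiples.add(gene)
--     if len(hits) == len(expected_genes):
--         return flag, multiples, True, mlst_genes
--     return flag, multiples, False, mlst_genes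
-- ===== SOURCE B (Python) =====
-- def _first_items(rel, seen):
--     """Items whose gene occurs for the first time, scanning rel left to right."""
--     if not rel:
--         return []
--     (item, gene), rest = rel[0], rel[1:]
--     if gene in seen:
--         return _first_items(rest, seen)
--     return [item] + _first_items(rest, seen + (gene,))
--
--
-- def _repeat_genes(rel, seen):
--     """Genes at their second-and-later occurrences, in order."""
--     if not rel:
--         return []
--     (_, gene), rest = rel[0], rel[1:]
--     if gene in seen:
--         return [gene] + _repeat_genes(rest, seen)
--     return _repeat_genes(rest, seen + (gene,))
--
--
-- def check_muliple_alelles(found_genes, expected_genes):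
--     rel = [(item, item.split("_")[0]) for item in found_genes
--            if item.split("_")[0] in expected_genes]
--     mlst_genes = set(_first_items(rel, ()))
--     dups = _repeat_genes(rel, ())
--     multiples = set(dict.fromkeys(dups))
--     flag = bool(dups)
--     distinct = set(g for _, g in rel)
--     complete = len(distinct) == len(expected_genes)
--     return flag, multiples, complete, mlst_genes
-- ===== Notes on version B (the rewrite author's own statement) =====
-- stated objective: alternative
-- what changed: A's single stateful loop carrying four variables (flag, hits, multiples, mlst) is replaced by a filter-once comprehension followed by independent passes: two recursive helpers that extract first-occurrence items and repeat genes, from which each component of the result is derived separately.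
import Mathlib
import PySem

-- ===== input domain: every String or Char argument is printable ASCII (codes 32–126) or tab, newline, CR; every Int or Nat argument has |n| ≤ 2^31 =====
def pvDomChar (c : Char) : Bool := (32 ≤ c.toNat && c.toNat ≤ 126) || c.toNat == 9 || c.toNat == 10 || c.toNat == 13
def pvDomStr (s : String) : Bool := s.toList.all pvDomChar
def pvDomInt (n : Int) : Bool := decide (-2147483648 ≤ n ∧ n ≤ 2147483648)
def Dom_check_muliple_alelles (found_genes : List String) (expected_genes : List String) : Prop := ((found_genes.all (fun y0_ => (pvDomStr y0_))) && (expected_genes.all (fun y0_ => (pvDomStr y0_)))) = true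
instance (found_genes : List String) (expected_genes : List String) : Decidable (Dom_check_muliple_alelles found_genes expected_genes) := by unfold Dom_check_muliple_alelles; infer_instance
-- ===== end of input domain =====

-- B restructures A's single four-variable loop into a filter-once comprehension plus two
-- independent recursive passes (first-occurrence items / repeat genes); objective: alternative.
-- Both Pythons return sets; the ports represent each set as the list of its distinct elements
-- in the order the set was built.

-- item.split("_")[0]  (split on a nonempty separator never yields an empty list, so [0] is total)
def pvGene (item : String) : String :=
  (((PySem.Str.split? item "_").getD []).headD "")

-- ===== PORT A =====
def check_muliple_alelles (found_genes : List String) (expected_genes : List String) : Bool × List String × Bool × List String :=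
  let st := found_genes.foldl
    (fun (st : Bool × PySem.Set String × PySem.Set String × PySem.Set String) item =>
      let (flag, hits, multiples, mlst_genes) := st
      let gene := pvGene item
      if expected_genes.contains gene then
        if !(PySem.Set.contains hits gene) then
          (flag, PySem.Set.add hits gene, multiples, PySem.Set.add mlst_genes item)
        else
          (true, hits, PySem.Set.add multiples gene, mlst_genes)
      else st)
    (false, PySem.Set.empty, PySem.Set.empty, PySem.Set.empty)
  let (flag, hits, multiples, mlst_genes) := st
  if hits.length == expected_genes.length then (flag, multiples, true, mlst_genes)
  else (flag, multiples, false, mlst_genes)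

-- ===== PORT B =====
-- _first_items(rel, seen): items whose gene occurs for the first time
def pvFirstItems (rel : List (String × String)) (seen : List String) : List String :=
  match rel with
  | [] => []
  | (item, gene) :: rest =>
    if seen.contains gene then pvFirstItems rest seen
    else item :: pvFirstItems rest (seen ++ [gene])

-- _repeat_genes(rel, seen): genes at their second-and-later occurrences, in order
def pvRepeatGenes (rel : List (String × String)) (seen : List String) : List String :=
  match rel with
  | [] => []
  | (_, gene) :: rest =>
    if seen.contains gene then gene :: pvRepeatGenes rest seen
    else pvRepeatGenes rest (seen ++ [gene])

def check_muliple_alelles_alt (found_genes : List String) (expected_genes : List String) : Bool × List String × Bool × List String :=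
  let rel := (found_genes.filter (fun item => expected_genes.contains (pvGene item))).map
    (fun item => (item, pvGene item))
  let mlst_genes := PySem.Set.ofList (pvFirstItems rel [])
  let dups := pvRepeatGenes rel []
  let multiples := PySem.Set.ofList (PySem.List.dedup dups)
  let flag := !dups.isEmpty
  let distinct := PySem.Set.ofList (rel.map Prod.snd)
  let complete := distinct.length == expected_genes.length
  (flag, multiples, complete, mlst_genes)

-- ===== PRECONDITION & SPEC =====
def Spec_check_muliple_alelles (found_genes : List String) (expected_genes : List String) (out : Bool × List String × Bool × List String) : Prop := out = check_muliple_alelles_alt found_genes expected_genes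
instance (found_genes : List String) (expected_genes : List String) (out : Bool × List String × Bool × List String) : Decidable (Spec_check_muliple_alelles found_genes expected_genes out) := by unfold Spec_check_muliple_alelles; infer_instance

-- ===== CLAIM (what is proved, stated in full; the proofs are below) =====
def Claim_equal_check_muliple_alelles : Prop := ∀ (found_genes : List String) (expected_genes : List String), Dom_check_muliple_alelles found_genes expected_genes → Spec_check_muliple_alelles found_genes expected_genes (check_muliple_alelles found_genes expected_genes)

-- ===== LEMMAS AND PROOFS =====

-- pairs of rel kept at the first occurrence of their gene (proof-side companion of the two helpers)
def pvFirstPairs (rel : List (String × String)) (seen : List String) : List (String × String) :=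
  match rel with
  | [] => []
  | (item, gene) :: rest =>
    if seen.contains gene then pvFirstPairs rest seen
    else (item, gene) :: pvFirstPairs rest (seen ++ [gene])

theorem firstItems_eq_map_fst (rel : List (String × String)) (seen : List String) :
    pvFirstItems rel seen = (pvFirstPairs rel seen).map Prod.fst := by
  induction rel generalizing seen with
  | nil => rfl
  | cons p rest ih =>
    obtain ⟨item, gene⟩ := p
    simp only [pvFirstItems, pvFirstPairs]
    split_ifs <;> simp [ih]

theorem firstPairs_snd (rel : List (String × String)) (seen : List String) :
    seen ++ (pvFirstPairs rel seen).map Prod.snd = PySem.Set.update seen (rel.map Prod.snd) := by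
  induction rel generalizing seen with
  | nil => simp [pvFirstPairs, PySem.Set.update]
  | cons p rest ih =>
    obtain ⟨item, gene⟩ := p
    simp only [pvFirstPairs, List.map_cons, PySem.Set.update_cons]
    by_cases h : gene ∈ seen
    · rw [PySem.Set.add_of_mem h]
      simp [h, ih]
    · rw [PySem.Set.add_of_not_mem h, ← ih (seen ++ [gene])]
      simp [h]

-- the main invariant: the effect of A's loop from an arbitrary state
theorem foldA (exp : List String) :
    ∀ (l : List String) (flag : Bool) (hits mul mlst : List String),
    (∀ it ∈ mlst, hits.contains (pvGene it) = true) →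
    l.foldl
      (fun (st : Bool × PySem.Set String × PySem.Set String × PySem.Set String) item =>
        let (flag, hits, multiples, mlst_genes) := st
        let gene := pvGene item
        if exp.contains gene then
          if !(PySem.Set.contains hits gene) then
            (flag, PySem.Set.add hits gene, multiples, PySem.Set.add mlst_genes item)
          else
            (true, hits, PySem.Set.add multiples gene, mlst_genes)
        else st)
      (flag, hits, mul, mlst) =
      (let rel := (l.filter (fun item => exp.contains (pvGene item))).map (fun item => (item, pvGene item))
       ( flag || !(pvRepeatGenes rel hits).isEmpty,
         hits ++ (pvFirstPairs rel hits).map Prod.snd,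
         PySem.Set.update mul (pvRepeatGenes rel hits),
         mlst ++ (pvFirstPairs rel hits).map Prod.fst )) := by
  intro l
  induction l with
  | nil =>
    intro flag hits mul mlst _
    simp [pvRepeatGenes, pvFirstPairs, PySem.Set.update]
  | cons x xs ih =>
    intro flag hits mul mlst hinv
    simp only [List.foldl_cons, List.filter_cons]
    by_cases hx : exp.contains (pvGene x)
    · simp only [hx, if_true, List.map_cons]
      by_cases hh : pvGene x ∈ hits
      · -- repeat occurrence
        have hc : PySem.Set.contains hits (pvGene x) = true := by simp [hh]
        simp only [hc, Bool.not_true, if_false, Bool.false_eq_true]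
        rw [ih true hits (PySem.Set.add mul (pvGene x)) mlst hinv]
        simp [pvRepeatGenes, pvFirstPairs, hh, PySem.Set.update_cons]
      · -- first occurrence
        have hc : PySem.Set.contains hits (pvGene x) = false := by simp [hh]
        have hxnot : x ∉ mlst := fun hmem => hh (by
          simpa [List.contains_eq_mem] using hinv x hmem)
        simp only [hc, Bool.not_false, if_true]
        rw [PySem.Set.add_of_not_mem hh, PySem.Set.add_of_not_mem hxnot,
          ih flag (hits ++ [pvGene x]) mul (mlst ++ [x]) ?_]
        · simp [pvRepeatGenes, pvFirstPairs, hh]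
        · intro it hit
          rcases List.mem_append.mp hit with h1 | h2
          · have := hinv it h1
            simp only [List.contains_eq_mem] at this ⊢
            simp_all
          · simp at h2
            subst h2
            simp [List.contains_eq_mem]
    · simp only [hx, if_false, Bool.false_eq_true]
      exact ih flag hits mul mlst hinv

-- ===== VERDICT (by name: the statement is the Claim_ definition above) =====
theorem check_muliple_alelles_spec : Claim_equal_check_muliple_alelles := by
  intro found_genes expected_genes _
  unfold Spec_check_muliple_alelles check_muliple_alelles check_muliple_alelles_alt
  rw [foldA expected_genes found_genes false PySem.Set.empty PySem.Set.empty PySem.Set.empty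
    (by intro it h; simp [PySem.Set.empty] at h)]
  set rel := (found_genes.filter (fun item => expected_genes.contains (pvGene item))).map
    (fun item => (item, pvGene item)) with hrel
  have hsnd : (pvFirstPairs rel []).map Prod.snd = PySem.Set.ofList (rel.map Prod.snd) := by
    simpa [PySem.Set.update_nil_left] using firstPairs_snd rel []
  have hfstsnd : (pvFirstPairs rel []).map Prod.snd
      = ((pvFirstPairs rel []).map Prod.fst).map pvGene := by
    have hmem : ∀ p ∈ pvFirstPairs rel [], p.2 = pvGene p.1 := by
      have hgen : ∀ (r : List (String × String)) (seen : List String),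
          (∀ p ∈ r, p.2 = pvGene p.1) → ∀ p ∈ pvFirstPairs r seen, p.2 = pvGene p.1 := by
        intro r
        induction r with
        | nil => intro seen h p hp; simp [pvFirstPairs] at hp
        | cons q rest ih =>
          intro seen h p hp
          obtain ⟨i, g⟩ := q
          simp only [pvFirstPairs] at hp
          split_ifs at hp with hg
          · exact ih seen (fun p hp' => h p (List.mem_cons_of_mem _ hp')) p hp
          · rcases List.mem_cons.mp hp with h1 | h2
            · subst h1; exact h (i, g) List.mem_cons_self
            · exact ih (seen ++ [g]) (fun p hp' => h p (List.mem_cons_of_mem _ hp')) p h2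
      refine hgen rel [] ?_
      intro p hp
      rw [hrel] at hp
      simp only [List.mem_map] at hp
      obtain ⟨it, _, rfl⟩ := hp
      rfl
    simp only [List.map_map]
    exact List.map_congr_left (fun p hp => hmem p hp)
  have hnodupfst : ((pvFirstPairs rel []).map Prod.fst).Nodup := by
    have hnodupsnd : ((pvFirstPairs rel []).map Prod.snd).Nodup := by
      rw [hsnd]; exact PySem.Set.nodup_ofList _
    rw [hfstsnd] at hnodupsnd
    exact hnodupsnd.of_map
  have hmlst : PySem.Set.ofList (pvFirstItems rel []) = (pvFirstPairs rel []).map Prod.fst := by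
    rw [firstItems_eq_map_fst]
    exact PySem.Set.ofList_eq_self_of_nodup _ hnodupfst
  have hmul : PySem.Set.update ([] : List String) (pvRepeatGenes rel [])
      = PySem.Set.ofList (PySem.List.dedup (pvRepeatGenes rel [])) := by
    simp [PySem.Set.update_nil_left]
  simp only [PySem.Set.empty, List.nil_append, Bool.false_or]
  by_cases hlen : ((PySem.Set.ofList (rel.map Prod.snd)).length == expected_genes.length) = true
  · simp [hsnd, hmul, hmlst, hlen]
  · simp only [Bool.not_eq_true] at hlen
    simp [hsnd, hmul, hmlst, hlen]
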